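-- pv_equiv track=rewrite | github.com/martinevd/adventofcode2024 | J21/day21.py | init_pad
-- ===== SOURCE A (Python) =====
-- def is_valid(sign,x,y,current):
--     for direct in current:
--         dx,dy = 0,0
--         if direct == "^":
--             dy = -1
--         elif direct == "v":
--             dy = 1
--         elif direct == ">":
--             dx = 1
--         elif direct == "<":
--             dx = -1
--         x,y = x+dx,y+dy
--         if (x,y) not in sign:
--             return False
--     return True
--
-- def all_permutation(sign,xstart,ystart,nup,ndown,nleft,nright,current,res):
--     if nup == 0 and ndown == 0 and nleft == 0 and nright == 0 :
--         if is_valid(sign,xstart,ystart,current):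
--             res.append(current)
--         return res
--     if nup > 0:
--         all_permutation(sign,xstart,ystart,nup - 1,ndown,nleft,nright,current + "^",res)
--     if ndown > 0:
--         all_permutation(sign,xstart,ystart,nup,ndown - 1,nleft,nright,current + "v",res)
--     if nleft > 0:
--         all_permutation(sign,xstart,ystart,nup,ndown,nleft - 1,nright,current + "<",res)
--     if nright > 0:
--         all_permutation(sign,xstart,ystart,nup,ndown,nleft,nright - 1,current + ">",res)
--     return res
--
-- def init_pad(sign):
--     pad = {}
--     for (x1,y1),val1 in sign.items():
--         for (x2,y2),val2 in sign.items():
--             dx,dy = x1-x2,y1-y2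
--             nup,ndown,nleft,nright = 0,0,0,0
--             if dy < 0:
--                 ndown = (-1)*dy
--             else:
--                 nup = dy
--             if dx < 0:
--                 nright = (-1)*dx
--             else:
--                 nleft = dx
--             pad[(val1,val2)] = all_permutation(sign,x1,y1,nup,ndown,nleft,nright,"",[])
--     return pad
-- ===== SOURCE B (Python) =====
-- def _delta(c):
--     return (0, -1) if c == '^' else (0, 1) if c == 'v' else (-1, 0) if c == '<' else (1, 0)
--
-- def _dfs(sign, x, y, vc, hc, nv, nh, cur, res):
--     if nv == 0 and nh == 0:
--         res.append(cur)
--         return res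
--     if nv > 0:
--         dx, dy = _delta(vc)
--         nx, ny = x + dx, y + dy
--         if (nx, ny) in sign:
--             _dfs(sign, nx, ny, vc, hc, nv - 1, nh, cur + vc, res)
--     if nh > 0:
--         dx, dy = _delta(hc)
--         nx, ny = x + dx, y + dy
--         if (nx, ny) in sign:
--             _dfs(sign, nx, ny, vc, hc, nv, nh - 1, cur + hc, res)
--     return res
--
-- def init_pad(sign):
--     pad = {}
--     for (x1, y1), val1 in sign.items():
--         for (x2, y2), val2 in sign.items():
--             dy, dx = y1 - y2, x1 - x2
--             vc, nv = ('v', -dy) if dy < 0 else ('^', dy)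
--             hc, nh = ('>', -dx) if dx < 0 else ('<', dx)
--             pad[(val1, val2)] = _dfs(sign, x1, y1, vc, hc, nv, nh, "", [])
--     return pad
-- ===== Notes on version B (the rewrite author's own statement) =====
-- stated objective: faster
-- what changed: B replaces A's enumerate-every-permutation-of-moves-then-validate-the-full-path search with a DFS that checks each step's grid membership incrementally and prunes invalid prefixes immediately, tracking only the two move characters and their counts instead of four counters.
import Mathlib
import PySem

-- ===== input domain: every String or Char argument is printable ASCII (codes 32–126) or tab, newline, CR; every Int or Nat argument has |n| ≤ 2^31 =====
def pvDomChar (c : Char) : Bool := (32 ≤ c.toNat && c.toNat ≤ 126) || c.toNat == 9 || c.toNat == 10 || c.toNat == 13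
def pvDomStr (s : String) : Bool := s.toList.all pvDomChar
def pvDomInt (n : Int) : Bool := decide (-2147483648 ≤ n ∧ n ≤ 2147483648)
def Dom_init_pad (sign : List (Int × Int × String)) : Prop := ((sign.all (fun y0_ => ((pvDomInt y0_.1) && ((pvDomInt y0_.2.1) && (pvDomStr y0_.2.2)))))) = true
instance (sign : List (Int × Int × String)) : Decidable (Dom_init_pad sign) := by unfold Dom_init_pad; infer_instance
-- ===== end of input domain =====

-- B replaces A's enumerate-every-permutation-then-validate-the-full-path search with a DFS that
-- checks each step incrementally and prunes invalid prefixes (tracking the two move chars only).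
-- (The `fuel` parameter of the recursive helpers is only a structural-termination guard: the entry
-- call passes the total number of moves, which the recursion never exceeds.)

-- ===== PORT A =====
-- the dx,dy computed by A's if/elif chain in is_valid
def deltaA (c : Char) : Int × Int :=
  if c = '^' then (0, -1)
  else if c = 'v' then (0, 1)
  else if c = '>' then (1, 0)
  else if c = '<' then (-1, 0)
  else (0, 0)

def isValidA (d : PySem.Dict (Int × Int) String) (x y : Int) : List Char → Bool
  | [] => true
  | c :: rest =>
    let δ := deltaA c
    if d.contains (x + δ.1, y + δ.2) then isValidA d (x + δ.1) (y + δ.2) rest else false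

def allPermA (d : PySem.Dict (Int × Int) String) (fuel : Nat) (xs ys nu nd nl nr : Int)
    (cur : List Char) (res : List String) : List String :=
  if nu == 0 && nd == 0 && nl == 0 && nr == 0 then
    (if isValidA d xs ys cur then res ++ [String.ofList cur] else res)
  else
    match fuel with
    | 0 => res
    | fuel + 1 =>
      let r1 := if 0 < nu then allPermA d fuel xs ys (nu - 1) nd nl nr (cur ++ ['^']) res else res
      let r2 := if 0 < nd then allPermA d fuel xs ys nu (nd - 1) nl nr (cur ++ ['v']) r1 else r1
      let r3 := if 0 < nl then allPermA d fuel xs ys nu nd (nl - 1) nr (cur ++ ['<']) r2 else r2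
      if 0 < nr then allPermA d fuel xs ys nu nd nl (nr - 1) (cur ++ ['>']) r3 else r3

def init_pad (sign : List (Int × Int × String)) : List (String × String × List String) :=
  let d := PySem.Dict.ofList (sign.map (fun e => ((e.1, e.2.1), e.2.2)))
  let pad := d.items.foldl (fun pad p1 =>
    d.items.foldl (fun pad p2 =>
      let dx := p1.1.1 - p2.1.1
      let dy := p1.1.2 - p2.1.2
      let nu := if dy < 0 then 0 else dy
      let nd := if dy < 0 then -dy else 0
      let nl := if dx < 0 then 0 else dx
      let nr := if dx < 0 then -dx else 0
      pad.insert (p1.2, p2.2)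
        (allPermA d (nu + nd + nl + nr).toNat p1.1.1 p1.1.2 nu nd nl nr [] [])) pad)
    PySem.Dict.empty
  pad.items.map (fun p => (p.1.1, p.1.2, p.2))

-- ===== PORT B =====
def deltaB (c : Char) : Int × Int :=
  if c = '^' then (0, -1)
  else if c = 'v' then (0, 1)
  else if c = '<' then (-1, 0)
  else (1, 0)

def dfsB (d : PySem.Dict (Int × Int) String) (fuel : Nat) (x y : Int) (vc hc : Char) (nv nh : Int)
    (cur : List Char) (res : List String) : List String :=
  if nv == 0 && nh == 0 then res ++ [String.ofList cur]
  else
    match fuel with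
    | 0 => res
    | fuel + 1 =>
      let r1 :=
        if 0 < nv then
          let δ := deltaB vc
          if d.contains (x + δ.1, y + δ.2) then
            dfsB d fuel (x + δ.1) (y + δ.2) vc hc (nv - 1) nh (cur ++ [vc]) res
          else res
        else res
      if 0 < nh then
        let δ := deltaB hc
        if d.contains (x + δ.1, y + δ.2) then
          dfsB d fuel (x + δ.1) (y + δ.2) vc hc nv (nh - 1) (cur ++ [hc]) r1
        else r1
      else r1

def init_pad_alt (sign : List (Int × Int × String)) : List (String × String × List String) :=
  let d := PySem.Dict.ofList (sign.map (fun e => ((e.1, e.2.1), e.2.2)))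
  let pad := d.items.foldl (fun pad p1 =>
    d.items.foldl (fun pad p2 =>
      let dy := p1.1.2 - p2.1.2
      let dx := p1.1.1 - p2.1.1
      let vc := if dy < 0 then 'v' else '^'
      let nv := if dy < 0 then -dy else dy
      let hc := if dx < 0 then '>' else '<'
      let nh := if dx < 0 then -dx else dx
      pad.insert (p1.2, p2.2) (dfsB d (nv + nh).toNat p1.1.1 p1.1.2 vc hc nv nh [] [])) pad)
    PySem.Dict.empty
  pad.items.map (fun p => (p.1.1, p.1.2, p.2))

-- ===== PRECONDITION & SPEC =====
def Spec_init_pad (sign : List (Int × Int × String)) (out : List (String × String × List String)) : Prop := out = init_pad_alt sign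
instance (sign : List (Int × Int × String)) (out : List (String × String × List String)) : Decidable (Spec_init_pad sign out) := by unfold Spec_init_pad; infer_instance

-- ===== CLAIM (what is proved, stated in full; the proofs are below) =====
def Claim_equal_init_pad : Prop := ∀ (sign : List (Int × Int × String)), Dom_init_pad sign → Spec_init_pad sign (init_pad sign)

-- ===== LEMMAS AND PROOFS =====

-- position after following cur from (x, y), ignoring validity
def movePos (x y : Int) (cur : List Char) : Int × Int :=
  cur.foldl (fun p c => (p.1 + (deltaA c).1, p.2 + (deltaA c).2)) (x, y)

theorem movePos_append (x y : Int) (cur : List Char) (c : Char) :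
    movePos x y (cur ++ [c]) =
      ((movePos x y cur).1 + (deltaA c).1, (movePos x y cur).2 + (deltaA c).2) := by
  simp [movePos, List.foldl_append]

theorem isValidA_append (d : PySem.Dict (Int × Int) String) (x y : Int) (cur : List Char) (c : Char) :
    isValidA d x y (cur ++ [c]) =
      (isValidA d x y cur &&
        d.contains ((movePos x y cur).1 + (deltaA c).1, (movePos x y cur).2 + (deltaA c).2)) := by
  induction cur generalizing x y with
  | nil => simp [isValidA, movePos]
  | cons a rest ih =>
    simp only [List.cons_append, isValidA]
    by_cases h : d.contains (x + (deltaA a).1, y + (deltaA a).2)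
    · simp only [h, if_true, ih]
      congr 1
    · simp [h]

-- an invalid prefix generates nothing
theorem allPermA_dead : ∀ (fuel : Nat) (d : PySem.Dict (Int × Int) String) (xs ys nu nd nl nr : Int)
    (cur : List Char) (res : List String),
    isValidA d xs ys cur = false →
    allPermA d fuel xs ys nu nd nl nr cur res = res := by
  intro fuel
  induction fuel with
  | zero =>
    intro d xs ys nu nd nl nr cur res hval
    rw [allPermA]
    split <;> simp [hval]
  | succ fuel ih =>
    intro d xs ys nu nd nl nr cur res hval
    have hdead : ∀ (c : Char) (nu' nd' nl' nr' : Int) (r : List String),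
        allPermA d fuel xs ys nu' nd' nl' nr' (cur ++ [c]) r = r := by
      intro c nu' nd' nl' nr' r
      exact ih d xs ys nu' nd' nl' nr' _ r (by rw [isValidA_append, hval]; simp)
    rw [allPermA]
    by_cases h0 : (nu == 0 && nd == 0 && nl == 0 && nr == 0) = true
    · simp [h0, hval]
    · simp only [h0]
      by_cases h1 : 0 < nu <;> by_cases h2 : 0 < nd <;> by_cases h3 : 0 < nl <;> by_cases h4 : 0 < nr <;>
        simp [h1, h2, h3, h4, hdead]

theorem core : ∀ (fuel : Nat) (d : PySem.Dict (Int × Int) String) (xs ys nu nd nl nr : Int)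
    (vc hc : Char) (cur : List Char) (res : List String),
    0 ≤ nu → 0 ≤ nd → 0 ≤ nl → 0 ≤ nr →
    (0 < nu → vc = '^') → (0 < nd → vc = 'v') →
    (0 < nl → hc = '<') → (0 < nr → hc = '>') →
    nu.toNat + nd.toNat + nl.toNat + nr.toNat ≤ fuel →
    isValidA d xs ys cur = true →
    allPermA d fuel xs ys nu nd nl nr cur res =
      dfsB d fuel (movePos xs ys cur).1 (movePos xs ys cur).2 vc hc (nu + nd) (nl + nr) cur res := by
  intro fuel
  induction fuel with
  | zero =>
    intro d xs ys nu nd nl nr vc hc cur res hnu hnd hnl hnr _ _ _ _ hn hval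
    have e1 : nu = 0 := by omega
    have e2 : nd = 0 := by omega
    have e3 : nl = 0 := by omega
    have e4 : nr = 0 := by omega
    subst e1; subst e2; subst e3; subst e4
    rw [allPermA, dfsB]
    simp [hval]
  | succ fuel ih =>
    intro d xs ys nu nd nl nr vc hc cur res hnu hnd hnl hnr hvu hvd hhl hhr hn hval
    have key : ∀ (c : Char) (nu' nd' nl' nr' : Int) (r : List String),
        nu'.toNat + nd'.toNat + nl'.toNat + nr'.toNat ≤ fuel →
        0 ≤ nu' → 0 ≤ nd' → 0 ≤ nl' → 0 ≤ nr' →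
        (0 < nu' → vc = '^') → (0 < nd' → vc = 'v') →
        (0 < nl' → hc = '<') → (0 < nr' → hc = '>') →
        allPermA d fuel xs ys nu' nd' nl' nr' (cur ++ [c]) r =
          if d.contains ((movePos xs ys cur).1 + (deltaA c).1,
              (movePos xs ys cur).2 + (deltaA c).2) then
            dfsB d fuel ((movePos xs ys cur).1 + (deltaA c).1)
              ((movePos xs ys cur).2 + (deltaA c).2)
              vc hc (nu' + nd') (nl' + nr') (cur ++ [c]) r
          else r := by
      intro c nu' nd' nl' nr' r hlt h1 h2 h3 h4 hv1 hv2 hv3 hv4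
      by_cases hm : d.contains ((movePos xs ys cur).1 + (deltaA c).1,
          (movePos xs ys cur).2 + (deltaA c).2)
      · rw [if_pos hm,
          ih d xs ys nu' nd' nl' nr' vc hc (cur ++ [c]) r h1 h2 h3 h4 hv1 hv2 hv3 hv4 hlt
            (by simp [isValidA_append, hval, hm]),
          movePos_append]
      · rw [if_neg hm]
        exact allPermA_dead fuel d xs ys nu' nd' nl' nr' _ r
          (by simp [isValidA_append, hval, hm])
    rw [allPermA, dfsB]
    by_cases hz : nu = 0 ∧ nd = 0 ∧ nl = 0 ∧ nr = 0
    · obtain ⟨e1, e2, e3, e4⟩ := hz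
      subst e1; subst e2; subst e3; subst e4
      simp [hval]
    · have hA : (nu == 0 && nd == 0 && nl == 0 && nr == 0) = false := by
        simp only [Bool.and_eq_false_iff, beq_eq_false_iff_ne, ne_eq]
        tauto
      have hB : ((nu + nd) == 0 && (nl + nr) == 0) = false := by
        simp only [Bool.and_eq_false_iff, beq_eq_false_iff_ne, ne_eq]
        omega
      rw [hA, hB]
      simp only [Bool.false_eq_true, if_false]
      have hhoriz : ∀ (r : List String),
          (if 0 < nr then
            allPermA d fuel xs ys nu nd nl (nr - 1) (cur ++ ['>'])
              (if 0 < nl then allPermA d fuel xs ys nu nd (nl - 1) nr (cur ++ ['<']) r else r)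
          else
            if 0 < nl then allPermA d fuel xs ys nu nd (nl - 1) nr (cur ++ ['<']) r else r) =
          (if 0 < nl + nr then
            if d.contains ((movePos xs ys cur).1 + (deltaB hc).1,
                (movePos xs ys cur).2 + (deltaB hc).2) = true then
              dfsB d fuel ((movePos xs ys cur).1 + (deltaB hc).1)
                ((movePos xs ys cur).2 + (deltaB hc).2)
                vc hc (nu + nd) (nl + nr - 1) (cur ++ [hc]) r
            else r
          else r) := by
        intro r
        by_cases h3 : 0 < nl
        · have hhc := hhl h3; subst hhc
          have hnr0 : ¬ 0 < nr := fun h => by simpa using hhr h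
          have hnh : 0 < nl + nr := by omega
          simp only [if_neg hnr0, if_pos h3, if_pos hnh]
          rw [key '<' nu nd (nl - 1) nr r (by omega) hnu hnd (by omega) hnr
            hvu hvd (fun _ => rfl) (fun h => absurd h hnr0)]
          have harr2 : nl - 1 + nr = nl + nr - 1 := by ring
          rw [harr2]
          have hdel : deltaB '<' = deltaA '<' := by decide
          rw [hdel]
        · by_cases h4 : 0 < nr
          · have hhc := hhr h4; subst hhc
            have hnh : 0 < nl + nr := by omega
            simp only [if_pos h4, if_neg h3, if_pos hnh]
            rw [key '>' nu nd nl (nr - 1) r (by omega) hnu hnd hnl (by omega)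
              hvu hvd (fun h => absurd h h3) (fun _ => rfl)]
            have harr2 : nl + (nr - 1) = nl + nr - 1 := by ring
            rw [harr2]
            have hdel : deltaB '>' = deltaA '>' := by decide
            rw [hdel]
          · have hnh : ¬ 0 < nl + nr := by omega
            simp only [if_neg h3, if_neg h4, if_neg hnh]
      by_cases h1 : 0 < nu
      · -- vertical char is '^', nd = 0
        have hvc := hvu h1; subst hvc
        have hnd0 : ¬ 0 < nd := fun h => by simpa using hvd h
        have hnv : 0 < nu + nd := by omega
        simp only [if_pos h1, if_neg hnd0, if_pos hnv]
        rw [key '^' (nu - 1) nd nl nr res (by omega) (by omega) hnd hnl hnr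
          (fun _ => rfl) (fun h => absurd h hnd0) hhl hhr]
        have harr : nu - 1 + nd = nu + nd - 1 := by ring
        rw [harr]
        have hdel : deltaB '^' = deltaA '^' := by decide
        rw [hdel]
        exact hhoriz _
      · by_cases h2 : 0 < nd
        · -- vertical char is 'v', nu = 0
          have hvc := hvd h2; subst hvc
          have hnv : 0 < nu + nd := by omega
          simp only [if_neg h1, if_pos h2, if_pos hnv]
          rw [key 'v' nu (nd - 1) nl nr res (by omega) hnu (by omega) hnl hnr
            hvu (fun _ => rfl) hhl hhr]
          have harr : nu + (nd - 1) = nu + nd - 1 := by ring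
          rw [harr]
          have hdel : deltaB 'v' = deltaA 'v' := by decide
          rw [hdel]
          exact hhoriz _
        · -- no vertical moves
          have hnv : ¬ 0 < nu + nd := by omega
          simp only [if_neg h1, if_neg h2, if_neg hnv]
          exact hhoriz _

-- per-pair equality: A's permutation enumeration equals B's pruned DFS
theorem pair_eq (d : PySem.Dict (Int × Int) String) (x1 y1 x2 y2 : Int) :
    allPermA d
      ((if y1 - y2 < 0 then 0 else y1 - y2) + (if y1 - y2 < 0 then -(y1 - y2) else 0) +
        (if x1 - x2 < 0 then 0 else x1 - x2) + (if x1 - x2 < 0 then -(x1 - x2) else 0)).toNat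
      x1 y1 (if y1 - y2 < 0 then 0 else y1 - y2)
      (if y1 - y2 < 0 then -(y1 - y2) else 0)
      (if x1 - x2 < 0 then 0 else x1 - x2)
      (if x1 - x2 < 0 then -(x1 - x2) else 0) [] [] =
    dfsB d
      ((if y1 - y2 < 0 then -(y1 - y2) else y1 - y2) +
        (if x1 - x2 < 0 then -(x1 - x2) else x1 - x2)).toNat
      x1 y1 (if y1 - y2 < 0 then 'v' else '^') (if x1 - x2 < 0 then '>' else '<')
      (if y1 - y2 < 0 then -(y1 - y2) else y1 - y2)
      (if x1 - x2 < 0 then -(x1 - x2) else x1 - x2) [] [] := by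
  by_cases hy : y1 - y2 < 0 <;> by_cases hx : x1 - x2 < 0 <;>
    simp only [if_pos, hy, hx, if_false]
  · exact (core _ d x1 y1 0 (-(y1 - y2)) 0 (-(x1 - x2)) 'v' '>' [] [] le_rfl (by omega)
      le_rfl (by omega) (by simp) (fun _ => rfl) (by simp) (fun _ => rfl) (by omega) rfl).trans
      (by norm_num [movePos])
  · exact (core _ d x1 y1 0 (-(y1 - y2)) (x1 - x2) 0 'v' '<' [] [] le_rfl (by omega)
      (by omega) le_rfl (by simp) (fun _ => rfl) (fun _ => rfl) (by simp) (by omega) rfl).trans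
      (by norm_num [movePos])
  · exact (core _ d x1 y1 (y1 - y2) 0 0 (-(x1 - x2)) '^' '>' [] [] (by omega) le_rfl
      le_rfl (by omega) (fun _ => rfl) (by simp) (by simp) (fun _ => rfl) (by omega) rfl).trans
      (by norm_num [movePos])
  · exact (core _ d x1 y1 (y1 - y2) 0 (x1 - x2) 0 '^' '<' [] [] (by omega) le_rfl
      (by omega) le_rfl (fun _ => rfl) (by simp) (fun _ => rfl) (by simp) (by omega) rfl).trans
      (by norm_num [movePos])

-- ===== VERDICT (by name: the statement is the Claim_ definition above) =====
theorem init_pad_spec : Claim_equal_init_pad := by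
  intro sign _
  show init_pad sign = init_pad_alt sign
  unfold init_pad init_pad_alt
  dsimp only
  congr 1
  refine congrArg _ (congrFun (congrFun (congrArg _ ?_) _) _)
  funext pad p1
  refine congrFun (congrFun (congrArg _ ?_) _) _
  funext pad2 p2
  rw [pair_eq]
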